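-- pv_equiv track=rewrite | github.com/yiwenxue/mice_new | causality/sleep_stage.py | idx_to_stage
-- ===== SOURCE A (Python) =====
-- def idx_to_stage(idx):
--     stages = []
--     last = idx[0]
--     i=1
--     while i < len(idx):
--         current = idx[i]
--         if (current - idx[i-1] > 1):
--             stages.append([last, idx[i-1]])
--             last = current
--         i+=1
--     return stages
-- ===== SOURCE B (Python) =====
-- def idx_to_stage(idx):
--     gaps = [i for i in range(1, len(idx)) if idx[i] - idx[i-1] > 1]
--     return [[idx[0] if k == 0 else idx[gaps[k-1]], idx[gaps[k]-1]]
--             for k in range(len(gaps))]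
-- ===== Notes on version B (the rewrite author's own statement) =====
-- stated objective: alternative
-- what changed: Replaces A's stateful while-loop (carrying 'last' and appending as it scans) by a two-phase decomposition: first collect the break positions as a list, then build one interval per break by indexing back into idx.
import Mathlib
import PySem

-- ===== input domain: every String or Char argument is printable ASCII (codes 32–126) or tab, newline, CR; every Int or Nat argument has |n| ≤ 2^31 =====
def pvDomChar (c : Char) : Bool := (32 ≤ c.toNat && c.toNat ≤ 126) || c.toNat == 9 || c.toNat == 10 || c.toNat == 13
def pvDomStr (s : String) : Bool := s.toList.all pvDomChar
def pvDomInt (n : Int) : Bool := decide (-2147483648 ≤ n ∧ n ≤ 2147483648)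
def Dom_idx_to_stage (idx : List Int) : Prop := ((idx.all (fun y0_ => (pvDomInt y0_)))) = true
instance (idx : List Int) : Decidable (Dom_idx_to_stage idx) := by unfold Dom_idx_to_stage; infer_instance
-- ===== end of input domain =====

-- B restates the run-grouping as: collect the break positions, then index back into idx;
-- same cost, a genuinely different decomposition (objective: alternative).

-- ===== PORT A =====
-- literal port of A's while-loop: state = (stages, last); indices are always in
-- range when Pre_ holds, so pyGetD is exact here.
def idx_to_stage (idx : List Int) : List (List Int) :=
  ((PySem.List.pyRange 1 (idx.length : Int) 1).foldl
    (fun (st : List (List Int) × Int) i =>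
      let current := PySem.List.pyGetD idx i 0
      if current - PySem.List.pyGetD idx (i - 1) 0 > 1 then
        (st.1 ++ [[st.2, PySem.List.pyGetD idx (i - 1) 0]], current)
      else st)
    ([], PySem.List.pyGetD idx 0 0)).1

-- ===== PORT B =====
-- literal port of Source B: gap list, then one interval per gap (all indices in range).
def idx_to_stage_alt (idx : List Int) : List (List Int) :=
  let gaps := (PySem.List.pyRange 1 (idx.length : Int) 1).filter
    (fun i => PySem.List.pyGetD idx i 0 - PySem.List.pyGetD idx (i - 1) 0 > 1)
  (PySem.List.pyRange 0 (gaps.length : Int) 1).map (fun k =>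
    [if k == 0 then PySem.List.pyGetD idx 0 0
     else PySem.List.pyGetD idx (PySem.List.pyGetD gaps (k - 1) 0) 0,
     PySem.List.pyGetD idx (PySem.List.pyGetD gaps k 0 - 1) 0])

-- ===== PRECONDITION & SPEC =====
-- Pre_ excludes only the empty list, on which Python A raises IndexError (idx[0]).
def Pre_idx_to_stage (idx : List Int) : Prop := idx ≠ []
instance (idx : List Int) : Decidable (Pre_idx_to_stage idx) := by unfold Pre_idx_to_stage; infer_instance
def pvWitness_idx_to_stage : List Int := ([1, 2, 5, 6, 9])

def Spec_idx_to_stage (idx : List Int) (out : List (List Int)) : Prop := out = idx_to_stage_alt idx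
instance (idx : List Int) (out : List (List Int)) : Decidable (Spec_idx_to_stage idx out) := by unfold Spec_idx_to_stage; infer_instance

-- ===== CLAIM (what is proved, stated in full; the proofs are below) =====
def Claim_equal_idx_to_stage : Prop := ∀ (idx : List Int), Dom_idx_to_stage idx → Pre_idx_to_stage idx → Spec_idx_to_stage idx (idx_to_stage idx)

-- ===== LEMMAS AND PROOFS =====

-- the loop body of A, named for the proofs
def pvStep (idx : List Int) (st : List (List Int) × Int) (i : Int) : List (List Int) × Int :=
  let current := PySem.List.pyGetD idx i 0
  if current - PySem.List.pyGetD idx (i - 1) 0 > 1 then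
    (st.1 ++ [[st.2, PySem.List.pyGetD idx (i - 1) 0]], current)
  else st

-- the gap condition of B, named for the proofs
def pvCond (idx : List Int) (i : Int) : Bool :=
  PySem.List.pyGetD idx i 0 - PySem.List.pyGetD idx (i - 1) 0 > 1

-- B's interval builder over an arbitrary gap list
def pvBof (idx : List Int) (gaps : List Int) : List (List Int) :=
  (PySem.List.pyRange 0 (gaps.length : Int) 1).map (fun k =>
    [if k == 0 then PySem.List.pyGetD idx 0 0
     else PySem.List.pyGetD idx (PySem.List.pyGetD gaps (k - 1) 0) 0,
     PySem.List.pyGetD idx (PySem.List.pyGetD gaps k 0 - 1) 0])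

-- the 'last' value A carries, read off a gap list
def pvLastOf (idx : List Int) (gaps : List Int) : Int :=
  match gaps.getLast? with
  | none => PySem.List.pyGetD idx 0 0
  | some p => PySem.List.pyGetD idx p 0

theorem pvGetD_append_left (xs ys : List Int) (k : Int) (h0 : 0 ≤ k) (h : k < xs.length) (d : Int) :
    PySem.List.pyGetD (xs ++ ys) k d = PySem.List.pyGetD xs k d := by
  rw [PySem.List.pyGetD_eq_getElem (xs ++ ys) d h0 (by simp; omega),
      PySem.List.pyGetD_eq_getElem xs d h0 (by omega)]
  exact List.getElem_append_left (by omega)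

theorem pvGetD_append_length (xs : List Int) (p d : Int) :
    PySem.List.pyGetD (xs ++ [p]) (xs.length : Int) d = p := by
  rw [PySem.List.pyGetD_eq_getElem (xs ++ [p]) d (by positivity) (by simp)]
  simp

theorem pvBof_snoc (idx gaps : List Int) (p : Int) :
    pvBof idx (gaps ++ [p]) = pvBof idx gaps ++ [[pvLastOf idx gaps, PySem.List.pyGetD idx (p - 1) 0]] := by
  unfold pvBof
  have hlen : (((gaps ++ [p]).length : Nat) : Int) = (gaps.length : Int) + 1 := by
    simp
  rw [hlen, PySem.List.pyRange_one_succ_right (by positivity), List.map_append]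
  congr 1
  · apply List.map_congr_left
    intro k hk
    have hk' := (PySem.List.mem_pyRange_one).1 hk
    have h1 : PySem.List.pyGetD (gaps ++ [p]) k 0 = PySem.List.pyGetD gaps k 0 :=
      pvGetD_append_left _ _ _ hk'.1 hk'.2 _
    by_cases h0 : k = 0
    · subst h0
      simp [h1]
    · have hk1 : PySem.List.pyGetD (gaps ++ [p]) (k - 1) 0 = PySem.List.pyGetD gaps (k - 1) 0 :=
        pvGetD_append_left _ _ _ (by omega) (by omega) _
      simp [h0, h1, hk1]
  · simp only [List.map_cons, List.map_nil]
    congr 1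
    have h2 : PySem.List.pyGetD (gaps ++ [p]) (gaps.length : Int) 0 = p :=
      pvGetD_append_length _ _ _
    rcases gaps with _ | ⟨g, gs⟩
    · simp at h2 ⊢
      simp [pvLastOf]
    · have hne : (g :: gs) ≠ ([] : List Int) := by simp
      have h3 : PySem.List.pyGetD ((g :: gs) ++ [p]) (((g :: gs).length : Int) - 1) 0
          = PySem.List.pyGetD (g :: gs) (((g :: gs).length : Int) - 1) 0 :=
        pvGetD_append_left _ _ _ (by simp) (by simp) _
      have h4 : PySem.List.pyGetD (g :: gs) (((g :: gs).length : Int) - 1) 0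
          = (g :: gs).getLast hne := by
        rw [PySem.List.pyGetD_eq_getElem _ 0 (by simp) (by simp)]
        rw [List.getLast_eq_getElem]
        congr 1
        omega
      have h5 : pvLastOf idx (g :: gs) = PySem.List.pyGetD idx ((g :: gs).getLast hne) 0 := by
        unfold pvLastOf
        rw [List.getLast?_eq_some_getLast hne]
      simp only [h2, h3, h4, h5]
      simp
      intro hx
      exact absurd hx (by omega)

theorem pvMain (idx : List Int) (n : Nat) :
    (PySem.List.pyRange 1 (n : Int) 1).foldl (pvStep idx) ([], PySem.List.pyGetD idx 0 0)
      = (pvBof idx ((PySem.List.pyRange 1 (n : Int) 1).filter (pvCond idx)),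
         pvLastOf idx ((PySem.List.pyRange 1 (n : Int) 1).filter (pvCond idx))) := by
  induction n with
  | zero =>
      rw [PySem.List.pyRange_one_eq_nil (by norm_num)]
      simp [pvBof, pvLastOf, PySem.List.pyRange_one_eq_nil]
  | succ n ih =>
      rcases Nat.eq_zero_or_pos n with h0 | h1
      · subst h0
        rw [show (((0 + 1 : Nat) : Int)) = 1 by norm_num,
            PySem.List.pyRange_one_eq_nil (by norm_num)]
        simp [pvBof, pvLastOf, PySem.List.pyRange_one_eq_nil]
      · have hc : ((n + 1 : Nat) : Int) = (n : Int) + 1 := by push_cast; ring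
        rw [hc, PySem.List.pyRange_one_succ_right (by exact_mod_cast h1),
            List.foldl_append, List.filter_append, ih]
        by_cases hcond : pvCond idx (n : Int) = true
        · have hfil : List.filter (pvCond idx) [(n : Int)] = [(n : Int)] := by
            rw [List.filter_singleton, hcond]
            rfl
          rw [hfil]
          have hgt : PySem.List.pyGetD idx (n : Int) 0 - PySem.List.pyGetD idx ((n : Int) - 1) 0 > 1 := by
            unfold pvCond at hcond
            exact of_decide_eq_true hcond
          simp only [List.foldl_cons, List.foldl_nil, pvStep, if_pos hgt]
          rw [pvBof_snoc]
          congr 1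
          unfold pvLastOf
          rw [List.getLast?_concat]
        · have hfil : List.filter (pvCond idx) [(n : Int)] = [] := by
            rw [List.filter_singleton, Bool.eq_false_iff.mpr hcond]
            rfl
          rw [hfil, List.append_nil]
          have hgt : ¬ (PySem.List.pyGetD idx (n : Int) 0 - PySem.List.pyGetD idx ((n : Int) - 1) 0 > 1) := by
            intro hx
            exact hcond (by unfold pvCond; exact decide_eq_true hx)
          simp only [List.foldl_cons, List.foldl_nil, pvStep, if_neg hgt]

-- ===== VERDICT (by name: the statement is the Claim_ definition above) =====
theorem idx_to_stage_spec : Claim_equal_idx_to_stage := by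
  intro idx _ _
  show idx_to_stage idx = idx_to_stage_alt idx
  have h := pvMain idx idx.length
  simp only [idx_to_stage, idx_to_stage_alt]
  show ((PySem.List.pyRange 1 (idx.length : Int) 1).foldl (pvStep idx) ([], PySem.List.pyGetD idx 0 0)).1
      = pvBof idx ((PySem.List.pyRange 1 (idx.length : Int) 1).filter (pvCond idx))
  rw [h]
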